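-- pv_equiv track=rewrite | github.com/chaitanyashankar/Programing-Data-Structures-and-Algorithms-using-Python-2024 | week4.py | multpoly
-- ===== SOURCE A (Python) =====
-- def multpoly(p1,p2):
--     result_dict=dict()
--     for coeff1,exp1 in p1:
--         for coeff2,exp2 in p2:
--             try:
--                 result_dict[exp1+exp2] += coeff1*coeff2
--             except:
--                 result_dict[exp1+exp2] = coeff1*coeff2
--     return sorted([(coeff,exp) for exp,coeff in result_dict.items() if coeff!=0],key=lambda x: x[1],reverse=True)
-- ===== SOURCE B (Python) =====
-- def multpoly(p1, p2):
--     # sort-then-merge-runs: flat product list, sort by exponent descending,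
--     # one scan summing each run of equal exponents (no dict).
--     prods = [(c1 * c2, e1 + e2) for c1, e1 in p1 for c2, e2 in p2]
--     prods.sort(key=lambda t: t[1], reverse=True)
--     result = []
--     i, n = 0, len(prods)
--     while i < n:
--         e = prods[i][1]
--         s = 0
--         while i < n and prods[i][1] == e:
--             s += prods[i][0]
--             i += 1
--         if s != 0:
--             result.append((s, e))
--     return result
-- ===== Notes on version B (the rewrite author's own statement) =====
-- stated objective: alternative
-- what changed: B replaces A's exponent-keyed dict accumulation with a flat product list that is sorted by exponent descending and then aggregated in one run-merging scan.
import Mathlib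
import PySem

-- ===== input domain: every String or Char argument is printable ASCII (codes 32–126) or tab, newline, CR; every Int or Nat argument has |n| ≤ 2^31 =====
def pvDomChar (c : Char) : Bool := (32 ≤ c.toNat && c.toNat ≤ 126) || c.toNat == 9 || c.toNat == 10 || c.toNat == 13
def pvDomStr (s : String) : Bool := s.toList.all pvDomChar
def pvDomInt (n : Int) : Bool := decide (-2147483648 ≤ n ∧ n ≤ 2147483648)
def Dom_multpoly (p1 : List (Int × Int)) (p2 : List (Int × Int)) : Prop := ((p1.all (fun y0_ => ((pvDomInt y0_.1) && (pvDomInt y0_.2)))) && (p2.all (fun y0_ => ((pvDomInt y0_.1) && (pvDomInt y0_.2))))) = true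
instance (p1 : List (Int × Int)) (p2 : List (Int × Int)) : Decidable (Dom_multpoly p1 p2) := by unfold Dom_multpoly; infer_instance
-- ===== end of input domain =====

set_option maxHeartbeats 1000000


-- B replaces A's exponent-keyed dict accumulation by sort-then-merge-runs (alternative decomposition; return values proved equal).

-- ===== PORT A =====
-- A: dict accumulation (try/except += is exactly Dict.modify with default 0), then
-- sorted([(coeff,exp) for exp,coeff in items if coeff!=0], key=x[1], reverse=True)
def multpoly (p1 : List (Int × Int)) (p2 : List (Int × Int)) : List (Int × Int) :=
  let d := p1.foldl (fun d a =>
    p2.foldl (fun d b => d.modify (a.2 + b.2) 0 (· + a.1 * b.1)) d) PySem.Dict.empty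
  PySem.List.sorted
    ((d.items.filter (fun p => p.2 != 0)).map (fun p => (p.2, p.1)))
    (fun x => x.2) true

-- ===== PORT B =====
-- B's grouping loop: state = the current run's (partial sum, exponent); emit on run change / end.
def scanRuns : Option (Int × Int) → List (Int × Int) → List (Int × Int)
  | none, [] => []
  | some st, [] => if st.1 ≠ 0 then [st] else []
  | none, p :: t => scanRuns (some p) t
  | some st, p :: t =>
      if p.2 = st.2 then scanRuns (some (st.1 + p.1, st.2)) t
      else (if st.1 ≠ 0 then [st] else []) ++ scanRuns (some p) t

def multpoly_alt (p1 : List (Int × Int)) (p2 : List (Int × Int)) : List (Int × Int) :=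
  let prods := p1.flatMap (fun a => p2.map (fun b => (a.1 * b.1, a.2 + b.2)))
  scanRuns none (PySem.List.sorted prods (fun t => t.2) true)

-- ===== PRECONDITION & SPEC =====
def Spec_multpoly (p1 : List (Int × Int)) (p2 : List (Int × Int)) (out : List (Int × Int)) : Prop := out = multpoly_alt p1 p2
instance (p1 : List (Int × Int)) (p2 : List (Int × Int)) (out : List (Int × Int)) : Decidable (Spec_multpoly p1 p2 out) := by unfold Spec_multpoly; infer_instance

-- ===== CLAIM (what is proved, stated in full; the proofs are below) =====
def Claim_equal_multpoly : Prop := ∀ (p1 : List (Int × Int)) (p2 : List (Int × Int)), Dom_multpoly p1 p2 → Spec_multpoly p1 p2 (multpoly p1 p2)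

-- ===== LEMMAS AND PROOFS =====

-- the coefficient of exponent e in a term list
def ssum (l : List (Int × Int)) (e : Int) : Int := ((l.filter (fun p => p.2 == e)).map (·.1)).sum

theorem ssum_nil (e : Int) : ssum [] e = 0 := rfl

theorem ssum_cons (p : Int × Int) (t : List (Int × Int)) (e : Int) :
    ssum (p :: t) e = (if p.2 = e then p.1 else 0) + ssum t e := by
  by_cases h : p.2 = e <;> simp [ssum, h]

theorem ssum_perm {l l' : List (Int × Int)} (h : l.Perm l') (e : Int) : ssum l e = ssum l' e := by
  unfold ssum
  exact ((h.filter _).map _).sum_eq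

theorem ssum_eq_zero_of_not_mem {l : List (Int × Int)} {e : Int} (h : e ∉ l.map (·.2)) :
    ssum l e = 0 := by
  induction l with
  | nil => rfl
  | cons p t ih =>
    simp only [List.map_cons, List.mem_cons, not_or] at h
    rw [ssum_cons, ih h.2, if_neg (fun hc => h.1 hc.symm)]
    ring

-- A's dict fold computes ssum at every key
theorem dict_fold_getD (l : List (Int × Int)) (d : PySem.Dict Int Int) (e : Int) :
    (l.foldl (fun d p => d.modify p.2 0 (· + p.1)) d).getD e 0 = d.getD e 0 + ssum l e := by
  induction l generalizing d with
  | nil => simp [ssum]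
  | cons p t ih =>
    by_cases h : p.2 = e
    · subst h
      simp [List.foldl_cons, ih, ssum_cons]
      ring
    · simp only [List.foldl_cons, ih, PySem.Dict.getD_modify, ssum_cons,
        if_neg h, if_neg (fun hh : e = p.2 => h hh.symm)]
      ring

-- A's nested fold over p1/p2 is the fold over the flat product list
theorem nested_fold_eq (p1 p2 : List (Int × Int)) (step : PySem.Dict Int Int → Int × Int → PySem.Dict Int Int) (d : PySem.Dict Int Int) :
    p1.foldl (fun d a => p2.foldl (fun d b => step d (a.1 * b.1, a.2 + b.2)) d) d
      = (p1.flatMap (fun a => p2.map (fun b => (a.1 * b.1, a.2 + b.2)))).foldl step d := by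
  induction p1 generalizing d with
  | nil => rfl
  | cons a t ih => simp [List.foldl_append, List.foldl_map, ih]

-- membership characterisation of scanRuns from a running state, over a descending-by-exponent tail
theorem scanRuns_some_mem (t : List (Int × Int)) (acc e : Int)
    (hs : t.Pairwise (fun a b => b.2 ≤ a.2)) (hb : ∀ p ∈ t, p.2 ≤ e) (c x : Int) :
    ((c, x) ∈ scanRuns (some (acc, e)) t ↔
      (x = e ∧ c = acc + ssum t e ∧ c ≠ 0) ∨
      (x ≠ e ∧ x ∈ t.map (·.2) ∧ c = ssum t x ∧ c ≠ 0)) := by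
  induction t generalizing acc e with
  | nil =>
    simp only [scanRuns, ssum_nil, List.map_nil, List.not_mem_nil]
    split_ifs with h
    · simp only [List.mem_singleton, Prod.mk.injEq]
      constructor
      · rintro ⟨hc, hx⟩; exact Or.inl ⟨hx, by omega, by omega⟩
      · rintro (⟨hx, hc, _⟩ | ⟨_, h', _⟩); exact ⟨by omega, hx⟩; exact absurd h' (by simp)
    · simp only [List.not_mem_nil, false_iff]
      rw [not_not] at h
      rintro (⟨_, hc, hne⟩ | ⟨_, h', _⟩)
      · exact hne (by omega)
      · exact h'
  | cons p t ih =>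
    obtain ⟨hb0, hbt⟩ := List.forall_mem_cons.mp hb
    have hst := (List.pairwise_cons.mp hs).2
    have hhd := (List.pairwise_cons.mp hs).1
    have hcx : ∀ y : Int, y ≠ p.2 → ssum (p :: t) y = ssum t y := by
      intro y hy; rw [ssum_cons, if_neg (fun hh => hy hh.symm)]; ring
    by_cases hpe : p.2 = e
    · have hce : ssum (p :: t) e = p.1 + ssum t e := by rw [ssum_cons, if_pos hpe]
      simp only [scanRuns, if_pos hpe]
      rw [ih (acc + p.1) e hst hbt]
      constructor
      · rintro (⟨hx, hc, hn⟩ | ⟨hx, hm, hc, hn⟩)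
        · exact Or.inl ⟨hx, by rw [hce]; omega, hn⟩
        · refine Or.inr ⟨hx, ?_, ?_, hn⟩
          · simp only [List.map_cons, List.mem_cons]; exact Or.inr hm
          · rw [hcx x (fun hh => hx (hh.trans hpe))]; exact hc
      · rintro (⟨hx, hc, hn⟩ | ⟨hx, hm, hc, hn⟩)
        · exact Or.inl ⟨hx, by rw [hce] at hc; omega, hn⟩
        · have hxp : x ≠ p.2 := fun hh => hx (hh.trans hpe)
          simp only [List.map_cons, List.mem_cons] at hm
          rcases hm with hm | hm
          · exact absurd hm hxp
          · exact Or.inr ⟨hx, hm, by rw [hcx x hxp] at hc; exact hc, hn⟩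
    · have hlt : p.2 < e := lt_of_le_of_ne hb0 hpe
      have htz : ssum t e = 0 := ssum_eq_zero_of_not_mem (by
        simp only [List.mem_map]; rintro ⟨q, hq, hq2⟩; exact absurd hq2 (by have := hhd q hq; omega))
      have hce : ssum (p :: t) e = 0 := by
        rw [ssum_cons, if_neg hpe, htz]; ring
      have hcp : ssum (p :: t) p.2 = p.1 + ssum t p.2 := by rw [ssum_cons, if_pos rfl]
      simp only [scanRuns, if_neg hpe, List.mem_append]
      rw [ih p.1 p.2 hst hhd]
      constructor
      · rintro (hmem | (⟨hx, hc, hn⟩ | ⟨hx, hm, hc, hn⟩))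
        · have hm' : c = acc ∧ x = e ∧ acc ≠ 0 := by
            split_ifs at hmem with hh
            · rcases List.mem_singleton.mp hmem with h'
              exact ⟨congrArg Prod.fst h', congrArg Prod.snd h', hh⟩
            · exact absurd hmem (List.not_mem_nil)
          exact Or.inl ⟨hm'.2.1, by rw [hce]; omega, by omega⟩
        · refine Or.inr ⟨by omega, ?_, ?_, hn⟩
          · simp only [List.map_cons, List.mem_cons]; exact Or.inl hx
          · rw [hx, hcp]; omega
        · have hxle : x ≤ p.2 := by
            rcases List.mem_map.mp hm with ⟨q, hq, hq2⟩; have := hhd q hq; omega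
          refine Or.inr ⟨by omega, ?_, ?_, hn⟩
          · simp only [List.map_cons, List.mem_cons]; exact Or.inr hm
          · rw [hcx x hx]; exact hc
      · rintro (⟨hx, hc, hn⟩ | ⟨hx, hm, hc, hn⟩)
        · rw [hce] at hc
          refine Or.inl ?_
          rw [if_pos (by omega : acc ≠ 0)]
          have : (c, x) = (acc, e) := by rw [hx, show c = acc by omega]
          rw [this]; exact List.mem_singleton.mpr rfl
        · simp only [List.map_cons, List.mem_cons] at hm
          by_cases hxp : x = p.2
          · exact Or.inr (Or.inl ⟨hxp, by rw [hxp, hcp] at hc; omega, hn⟩)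
          · rcases hm with hm | hm
            · exact absurd hm hxp
            · exact Or.inr (Or.inr ⟨hxp, hm, by rw [hcx x hxp] at hc; exact hc, hn⟩)

-- scanRuns output is strictly descending in the exponent, and bounded by the state's exponent
theorem scanRuns_some_sorted (t : List (Int × Int)) (acc e : Int)
    (hs : t.Pairwise (fun a b => b.2 ≤ a.2)) (hb : ∀ p ∈ t, p.2 ≤ e) :
    (scanRuns (some (acc, e)) t).Pairwise (fun a b => b.2 < a.2) ∧
      ∀ q ∈ scanRuns (some (acc, e)) t, q.2 ≤ e := by
  induction t generalizing acc e with
  | nil =>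
    by_cases h : acc ≠ 0
    · have hrw : scanRuns (some (acc, e)) [] = [(acc, e)] := by
        show (if acc ≠ 0 then _ else _) = _
        rw [if_pos h]
      rw [hrw]
      exact ⟨by simp, by intro q hq; simp at hq; simp [hq]⟩
    · have hrw : scanRuns (some (acc, e)) [] = [] := by
        show (if acc ≠ 0 then _ else _) = _
        rw [if_neg h]
      rw [hrw]
      exact ⟨by simp, by intro q hq; simp at hq⟩
  | cons p t ih =>
    obtain ⟨hb0, hbt⟩ := List.forall_mem_cons.mp hb
    have hst := (List.pairwise_cons.mp hs).2
    have hhd := (List.pairwise_cons.mp hs).1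
    by_cases hpe : p.2 = e
    · have hrw : scanRuns (some (acc, e)) (p :: t) = scanRuns (some (acc + p.1, e)) t := by
        show (if p.2 = e then _ else _) = _
        rw [if_pos hpe]
      rw [hrw]
      exact ih (acc + p.1) e hst hbt
    · have hlt : p.2 < e := lt_of_le_of_ne hb0 hpe
      obtain ⟨ihs, ihb⟩ := ih p.1 p.2 hst (fun q hq => hhd q hq)
      have hrw : scanRuns (some (acc, e)) (p :: t)
          = (if acc ≠ 0 then [((acc : Int), e)] else []) ++ scanRuns (some (p.1, p.2)) t := by
        show (if p.2 = e then _ else _) = _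
        rw [if_neg hpe]
      rw [hrw]
      constructor
      · refine List.pairwise_append.mpr ⟨?_, ihs, ?_⟩
        · split_ifs <;> simp
        · intro a ha b hb
          have ha' : a = (acc, e) := by
            split_ifs at ha with h
            · simpa using ha
            · exact absurd ha List.not_mem_nil
          have hble := ihb b hb
          rw [ha']
          omega
      · intro q hq
        rcases List.mem_append.mp hq with hq | hq
        · split_ifs at hq with h
          · have hq' : q = (acc, e) := by simpa using hq
            simp [hq']
          · exact absurd hq List.not_mem_nil
        · have := ihb q hq; omega

-- list-level restatement of A's comprehension (filter-then-swap)
theorem mem_filter_swap (l : List (Int × Int)) (c e : Int) :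
    ((c, e) ∈ (l.filter (fun p => p.2 != 0)).map (fun p => (p.2, p.1)) ↔
      (e, c) ∈ l ∧ c ≠ 0) := by
  simp only [List.mem_map, List.mem_filter, bne_iff_ne, ne_eq, Prod.mk.injEq]
  constructor
  · rintro ⟨⟨a, b⟩, ⟨hm, hn⟩, hb, ha⟩; simp_all
  · rintro ⟨hm, hn⟩; exact ⟨(e, c), ⟨hm, hn⟩, rfl, rfl⟩

theorem multpoly_spec : Claim_equal_multpoly := by
  intro p1 p2 _
  unfold Spec_multpoly multpoly multpoly_alt
  set prods := p1.flatMap (fun a => p2.map (fun b => (a.1 * b.1, a.2 + b.2))) with hprods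
  set d := p1.foldl (fun d a =>
    p2.foldl (fun d b => d.modify (a.2 + b.2) 0 (· + a.1 * b.1)) d) PySem.Dict.empty with hd
  have hdfold : d = prods.foldl (fun d p => d.modify p.2 0 (· + p.1)) PySem.Dict.empty :=
    nested_fold_eq p1 p2 (fun d q => d.modify q.2 0 (· + q.1)) PySem.Dict.empty
  have hnodup : d.keys.Nodup := by
    rw [hdfold]
    exact PySem.Dict.nodup_keys_foldl_modify_key prods (·.2) 0
      (fun d p => (· + p.1)) PySem.Dict.empty (by simp)
  have hkeys : ∀ e : Int, e ∈ d.keys ↔ e ∈ prods.map (·.2) := by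
    intro e
    rw [hdfold, PySem.Dict.keys_foldl_modify_key]
    simp [PySem.Set.mem_update, PySem.Dict.keys_empty]
  have hgetD : ∀ e : Int, d.getD e 0 = ssum prods e := by
    intro e; rw [hdfold, dict_fold_getD]; simp [PySem.Dict.getD_empty]
  -- membership characterisation of the A side (before sorting)
  have hAmem : ∀ c e : Int,
      ((c, e) ∈ (d.items.filter (fun p => p.2 != 0)).map (fun p => (p.2, p.1)) ↔
        e ∈ prods.map (·.2) ∧ c = ssum prods e ∧ c ≠ 0) := by
    intro c e
    rw [mem_filter_swap]
    constructor
    · rintro ⟨hm, hn⟩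
      have hg : d.get? e = some c := PySem.Dict.get?_of_mem_items d hm hnodup
      have hk : e ∈ d.keys := PySem.Dict.mem_keys_of_mem_items d hm
      refine ⟨(hkeys e).mp hk, ?_, hn⟩
      rw [← hgetD e, PySem.Dict.getD_eq_get?_getD, hg]; rfl
    · rintro ⟨hm, hc, hn⟩
      have hk : e ∈ d.keys := (hkeys e).mpr hm
      have hg : ∃ v, d.get? e = some v := by
        rcases ho : d.get? e with _ | v
        · exact absurd hk ((PySem.Dict.get?_eq_none_iff_not_mem_keys d e).mp ho)
        · exact ⟨v, rfl⟩
      rcases hg with ⟨v, hv⟩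
      have : v = c := by
        have := hgetD e; rw [PySem.Dict.getD_eq_get?_getD, hv] at this
        simpa [hc] using this
      exact ⟨this ▸ PySem.Dict.mem_items_of_get?_eq_some d hv, hn⟩
  -- the sorted B-side list
  set S := PySem.List.sorted prods (fun t => t.2) true with hS
  have hSperm : S.Perm prods := PySem.List.sorted_perm prods (fun t => t.2) true
  have hSsort : S.Pairwise (fun a b => b.2 ≤ a.2) :=
    PySem.List.sorted_pairwise_rev prods (fun t => t.2)
  -- membership characterisation of the B side
  have hBmem : ∀ c e : Int,
      ((c, e) ∈ scanRuns none S ↔ e ∈ prods.map (·.2) ∧ c = ssum prods e ∧ c ≠ 0) := by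
    intro c e
    cases hS0 : S with
    | nil =>
      have : prods = [] := (hS0 ▸ hSperm).nil_eq.symm
      simp [scanRuns, this, ssum_nil]
    | cons p t =>
      have hst : t.Pairwise (fun a b => b.2 ≤ a.2) := (List.pairwise_cons.mp (hS0 ▸ hSsort)).2
      have hhd := (List.pairwise_cons.mp (hS0 ▸ hSsort)).1
      have hperm : (p :: t).Perm prods := hS0 ▸ hSperm
      have hsum : ∀ x, ssum (p :: t) x = ssum prods x := fun x => ssum_perm hperm x
      have hmapmem : ∀ x : Int, x ∈ prods.map (·.2) ↔ x ∈ (p :: t).map (·.2) := by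
        intro x; exact ⟨fun h => (hperm.map (·.2)).mem_iff.mpr h, fun h => (hperm.map (·.2)).mem_iff.mp h⟩
      show (c, e) ∈ scanRuns (some p) t ↔ _
      rw [show (some p : Option (Int × Int)) = some (p.1, p.2) from rfl]
      rw [scanRuns_some_mem t p.1 p.2 hst hhd c e]
      constructor
      · rintro (⟨hx, hc, hn⟩ | ⟨hx, hm, hc, hn⟩)
        · subst hx
          refine ⟨(hmapmem p.2).mpr (by simp), ?_, hn⟩
          rw [← hsum p.2, ssum_cons, if_pos rfl]; omega
        · refine ⟨(hmapmem e).mpr (by simp [hm]), ?_, hn⟩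
          rw [← hsum e, ssum_cons, if_neg (fun hh : p.2 = e => hx hh.symm)]; omega
      · rintro ⟨hm, hc, hn⟩
        have hc' : c = ssum (p :: t) e := by rw [hsum]; exact hc
        by_cases hx : e = p.2
        · subst hx
          rw [ssum_cons, if_pos rfl] at hc'
          exact Or.inl ⟨rfl, by omega, hn⟩
        · rw [ssum_cons, if_neg (fun hh : p.2 = e => hx hh.symm)] at hc'
          refine Or.inr ⟨hx, ?_, by omega, hn⟩
          rcases List.mem_cons.mp ((hmapmem e).mp hm) with hh | hh
          · exact absurd hh hx
          · exact hh
  -- B's output is strictly descending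
  have hBsort : (scanRuns none S).Pairwise (fun a b => b.2 < a.2) := by
    cases hS0 : S with
    | nil => simp [scanRuns]
    | cons p t =>
      have hst := (List.pairwise_cons.mp (hS0 ▸ hSsort)).2
      have hhd := (List.pairwise_cons.mp (hS0 ▸ hSsort)).1
      show (scanRuns (some p) t).Pairwise _
      rw [show (some p : Option (Int × Int)) = some (p.1, p.2) from rfl]
      exact (scanRuns_some_sorted t p.1 p.2 hst hhd).1
  -- A's output is strictly descending: sorted gives ≤, distinct keys give ≠
  set F := (d.items.filter (fun p => p.2 != 0)).map (fun p => (p.2, p.1)) with hF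
  set A := PySem.List.sorted F (fun x => x.2) true with hA
  have hAperm : A.Perm F := PySem.List.sorted_perm F (fun x => x.2) true
  have hFnodup : (F.map (·.2)).Nodup := by
    rw [hF]
    have : ((d.items.filter (fun p => p.2 != 0)).map (fun p => (p.2, p.1))).map (·.2)
        = (d.items.filter (fun p => p.2 != 0)).map (·.1) := by
      simp [List.map_map, Function.comp]
    rw [this]
    have hsub : (d.items.filter (fun p => p.2 != 0)).Sublist d.items := List.filter_sublist
    have hkn : (d.items.map (fun p : Int × Int => p.1)).Nodup := hnodup
    exact (hsub.map (fun p : Int × Int => p.1)).nodup hkn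
  have hAnodup : (A.map (·.2)).Nodup := ((hAperm.map (·.2)).nodup_iff).mpr hFnodup
  have hAsort : A.Pairwise (fun a b => b.2 < a.2) := by
    have hle : A.Pairwise (fun a b => b.2 ≤ a.2) :=
      PySem.List.sorted_pairwise_rev F (fun x => x.2)
    have hne : A.Pairwise (fun a b => a.2 ≠ b.2) := List.pairwise_map.mp hAnodup
    exact (hle.and hne).imp (fun h => lt_of_le_of_ne h.1 (fun hh => h.2 hh.symm))
  -- two strictly descending lists with the same members are equal
  have hmem : ∀ x : Int × Int, x ∈ A ↔ x ∈ scanRuns none S := by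
    rintro ⟨c, e⟩
    rw [hAperm.mem_iff, hF, hAmem c e, hBmem c e]
  have hAnd : A.Nodup := hAsort.imp (fun {a b} h heq => absurd (heq ▸ h) (lt_irrefl _))
  have hBnd : (scanRuns none S).Nodup := hBsort.imp (fun {a b} h heq => absurd (heq ▸ h) (lt_irrefl _))
  have hperm : A.Perm (scanRuns none S) := (List.perm_ext_iff_of_nodup hAnd hBnd).mpr hmem
  exact hperm.eq_of_pairwise
    (fun a b _ _ h1 h2 => absurd (h1.trans h2) (lt_irrefl _)) hAsort hBsort
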